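-- pv_equiv track=rewrite | github.com/DIG-Network/proof_research | sub-problems/verifier-oracle-model/experiments/partial-view-z-interval-formula-regression/script.py | formula_counts_per_q
-- ===== SOURCE A (Python) =====
-- import math
--
-- def z_interval(n: int, k: int, w: int) -> tuple[int, int]:
--     """Inclusive integer z-range for which some completion has total weight w."""
--     r = n - k
--     lo = max(0, w - r)
--     hi = min(k, w)
--     return lo, hi
--
-- def in_interval(z: int, lo: int, hi: int) -> bool:
--     return lo <= z <= hi
--
-- def cell(ok_sub: bool, ok_q: bool) -> str:
--     if ok_sub and ok_q:
--         return "both"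
--     if ok_sub and not ok_q:
--         return "only_wt5"
--     if not ok_sub and ok_q:
--         return "only_wt6"
--     return "neither"
--
-- def formula_counts_per_q(n: int, k: int, t: int) -> dict[str, int]:
--     """Patterns on a fixed Q: sum_z binom(k,z) over each cell (totals 2^k)."""
--     lo_sub, hi_sub = z_interval(n, k, t - 1)
--     lo_q, hi_q = z_interval(n, k, t)
--     out = {c: 0 for c in ("both", "only_wt5", "only_wt6", "neither")}
--     for z in range(k + 1):
--         ok_sub = in_interval(z, lo_sub, hi_sub)
--         ok_q = in_interval(z, lo_q, hi_q)
--         out[cell(ok_sub, ok_q)] += math.comb(k, z)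
--     return out
-- ===== SOURCE B (Python) =====
-- def formula_counts_per_q(n: int, k: int, t: int) -> dict:
--     """Staged algorithm: one pass builds a prefix-sum table of binom(k, z)
--     (via the multiplicative recurrence), then -- because the sub/q z-intervals
--     are nested one-step shifts of each other -- each cell is a single
--     contiguous z-range answered by an O(1) prefix-difference query, and
--     'neither' is the complement of the other three."""
--     r = n - k
--     lo_sub, hi_sub = max(0, t - 1 - r), min(k, t - 1)
--     lo_q, hi_q = max(0, t - r), min(k, t)
--     # prefix[i] = sum of binom(k, z) for z < i
--     prefix = [0]
--     s = 0
--     c = 1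
--     for z in range(k + 1):
--         s += c
--         prefix.append(s)
--         c = c * (k - z) // (z + 1)
--
--     def rs(lo, hi):  # sum of binom(k, z) for lo <= z <= hi; callers keep 0 <= lo, hi <= k
--         return prefix[hi + 1] - prefix[lo] if lo <= hi else 0
--
--     both = rs(lo_q, hi_sub)                       # in sub and in q
--     only5 = rs(lo_sub, min(hi_sub, lo_q - 1))     # in sub, left of q
--     only6 = rs(max(lo_q, hi_sub + 1), hi_q)       # in q, right of sub
--     return {"both": both, "only_wt5": only5, "only_wt6": only6,
--             "neither": s - both - only5 - only6}
-- ===== Notes on version B (the rewrite author's own statement) =====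
-- stated objective: faster
-- what changed: Replaces A's single pass that classifies every z in [0,k] into a cell and adds math.comb(k,z) by a staged algorithm: build a prefix-sum table of binom(k,z) once (multiplicative recurrence), observe the sub/q intervals are one-step nested shifts so each cell is one contiguous z-range, answer the three cells by O(1) prefix-difference queries and 'neither' as the complement of the total.
import Mathlib
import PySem

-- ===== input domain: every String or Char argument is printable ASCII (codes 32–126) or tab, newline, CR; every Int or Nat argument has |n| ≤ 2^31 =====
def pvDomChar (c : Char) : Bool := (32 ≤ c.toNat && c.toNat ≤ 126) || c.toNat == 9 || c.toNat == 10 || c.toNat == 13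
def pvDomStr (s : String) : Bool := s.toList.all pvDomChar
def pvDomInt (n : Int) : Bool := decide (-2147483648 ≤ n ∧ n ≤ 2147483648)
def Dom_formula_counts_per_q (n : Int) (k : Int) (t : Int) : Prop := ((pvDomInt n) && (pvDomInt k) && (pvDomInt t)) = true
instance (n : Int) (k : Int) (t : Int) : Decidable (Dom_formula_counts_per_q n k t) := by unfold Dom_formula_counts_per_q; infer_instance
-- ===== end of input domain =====

-- B builds a prefix-sum table of binom(k,z) once and answers each cell as one
-- contiguous z-range by a prefix-difference query (objective: faster).

-- ===== PORT A =====
-- math.comb(a, b); exact for 0 ≤ b and 0 ≤ a (the only arguments A passes: 0 ≤ z ≤ k)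
def pvComb (a b : Int) : Int := ((a.toNat.choose b.toNat : Nat) : Int)

def z_interval (n : Int) (k : Int) (w : Int) : Int × Int :=
  let r := n - k
  (max 0 (w - r), min k w)

def in_interval (z : Int) (lo : Int) (hi : Int) : Bool := decide (lo ≤ z ∧ z ≤ hi)

def cell (ok_sub : Bool) (ok_q : Bool) : String :=
  if ok_sub && ok_q then "both"
  else if ok_sub && !ok_q then "only_wt5"
  else if !ok_sub && ok_q then "only_wt6"
  else "neither"

-- loop body of A: out[cell(ok_sub, ok_q)] += math.comb(k, z); the key is always
-- one of the four pre-inserted keys, so Dict.modify (default never used) is exact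
def pvStepA (lo_sub hi_sub lo_q hi_q k : Int) (d : PySem.Dict String Int) (z : Int) :
    PySem.Dict String Int :=
  let ok_sub := in_interval z lo_sub hi_sub
  let ok_q := in_interval z lo_q hi_q
  d.modify (cell ok_sub ok_q) 0 (· + pvComb k z)

def formula_counts_per_q (n : Int) (k : Int) (t : Int) : List (String × Int) :=
  let lsub := z_interval n k (t - 1)
  let lq := z_interval n k t
  let out : PySem.Dict String Int :=
    PySem.Dict.ofList [("both", 0), ("only_wt5", 0), ("only_wt6", 0), ("neither", 0)]
  ((PySem.List.pyRange 0 (k + 1) 1).foldl (pvStepA lsub.1 lsub.2 lq.1 lq.2 k) out).items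

-- ===== PORT B =====
-- loop body of B: state (prefix, s, c); s += c; prefix.append(s); c = c*(k-z)//(z+1)
def pvStepP (k : Int) (st : List Int × Int × Int) (z : Int) : List Int × Int × Int :=
  let s := st.2.1 + st.2.2
  (st.1 ++ [s], s, PySem.Int.floordiv (st.2.2 * (k - z)) (z + 1))

-- rs(lo, hi): prefix[hi+1] - prefix[lo] if lo <= hi else 0.
-- Python list indexing raises out of range; every call keeps 0 ≤ lo ≤ hi+1 ≤ len-1
-- when the branch is taken, so the .getD 0 default is never used (proved below).
def pvRs (pref : List Int) (lo hi : Int) : Int :=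
  if lo ≤ hi then
    (PySem.List.pyGet? pref (hi + 1)).getD 0 - (PySem.List.pyGet? pref lo).getD 0
  else 0

def formula_counts_per_q_alt (n : Int) (k : Int) (t : Int) : List (String × Int) :=
  let r := n - k
  let lo_sub := max 0 (t - 1 - r)
  let hi_sub := min k (t - 1)
  let lo_q := max 0 (t - r)
  let hi_q := min k t
  let st := (PySem.List.pyRange 0 (k + 1) 1).foldl (pvStepP k) ([0], 0, 1)
  let pref := st.1
  let s := st.2.1
  let both := pvRs pref lo_q hi_sub
  let only5 := pvRs pref lo_sub (min hi_sub (lo_q - 1))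
  let only6 := pvRs pref (max lo_q (hi_sub + 1)) hi_q
  [("both", both), ("only_wt5", only5), ("only_wt6", only6),
   ("neither", s - both - only5 - only6)]

-- ===== PRECONDITION & SPEC =====
def Spec_formula_counts_per_q (n : Int) (k : Int) (t : Int) (out : List (String × Int)) : Prop := out = formula_counts_per_q_alt n k t
instance (n : Int) (k : Int) (t : Int) (out : List (String × Int)) : Decidable (Spec_formula_counts_per_q n k t out) := by unfold Spec_formula_counts_per_q; infer_instance

-- ===== CLAIM (what is proved, stated in full; the proofs are below) =====
def Claim_equal_formula_counts_per_q : Prop := ∀ (n : Int) (k : Int) (t : Int), Dom_formula_counts_per_q n k t → Spec_formula_counts_per_q n k t (formula_counts_per_q n k t)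

-- ===== LEMMAS AND PROOFS =====

-- Σ_{i<m} binom(k, z+i)
def pvR (k : Int) : Int → Nat → Int
  | _, 0 => 0
  | z, (m+1) => pvComb k z + pvR k (z+1) m

-- Σ_{i<m} (if p (z+i) then binom(k, z+i) else 0)
def pvTif (p : Int → Bool) (k : Int) : Int → Nat → Int
  | _, 0 => 0
  | z, (m+1) => (if p z then pvComb k z else 0) + pvTif p k (z+1) m

-- Pascal-style step: binom(k,z) * (k-z) // (z+1) = binom(k,z+1) for 0 ≤ z ≤ k
lemma pvComb_step (k z : Int) (hz : 0 ≤ z) (hzk : z ≤ k) :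
    PySem.Int.floordiv (pvComb k z * (k - z)) (z + 1) = pvComb k (z + 1) := by
  unfold pvComb
  have h1 : k - z = ((k.toNat - z.toNat : Nat) : Int) := by omega
  have h2 : z + 1 = ((z.toNat + 1 : Nat) : Int) := by omega
  have h3 : (z + 1).toNat = z.toNat + 1 := by omega
  rw [h1, h3]
  rw [show ((k.toNat.choose z.toNat : Nat) : Int) * ((k.toNat - z.toNat : Nat) : Int)
      = ((k.toNat.choose z.toNat * (k.toNat - z.toNat) : Nat) : Int) by push_cast; ring, h2,
      PySem.Int.floordiv_natCast]
  norm_cast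
  rw [← Nat.choose_succ_right_eq, Nat.mul_div_cancel _ (by omega)]

lemma pvTif_ext (p q : Int → Bool) (k : Int) (h : ∀ x, p x = q x) :
    ∀ (m : Nat) (z : Int), pvTif p k z m = pvTif q k z m := by
  intro m
  induction m with
  | zero => intro z; rfl
  | succ m ih => intro z; simp only [pvTif, h z, ih]

-- the four mutually exclusive cells sum to the whole range
lemma pvPartition (s q : Int → Bool) (k : Int) :
    ∀ (m : Nat) (z : Int),
      pvTif (fun x => s x && q x) k z m + pvTif (fun x => s x && !q x) k z m
      + pvTif (fun x => !s x && q x) k z m + pvTif (fun x => !s x && !q x) k z m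
      = pvR k z m := by
  intro m
  induction m with
  | zero => intro z; rfl
  | succ m ih =>
    intro z
    simp only [pvTif, pvR, ← ih (z+1)]
    rcases Bool.eq_false_or_eq_true (s z) with hs | hs <;>
      rcases Bool.eq_false_or_eq_true (q z) with hq | hq <;> simp [hs, hq] <;> ring

-- splitting pvR at an intermediate point
lemma pvR_split (k : Int) (a b : Nat) :
    ∀ (z : Int), pvR k z (a + b) = pvR k z a + pvR k (z + a) b := by
  induction a with
  | zero => intro z; simp [pvR]
  | succ a ih =>
    intro z
    have h1 : a + 1 + b = (a + b) + 1 := by omega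
    rw [h1]
    simp only [pvR, ih (z+1)]
    have h2 : z + 1 + (a : Int) = z + ((a : Nat) + 1 : Nat) := by push_cast; ring
    rw [h2]
    ring

-- a filtered sum over an interval condition is a contiguous pvR block
lemma pvTif_int (lo hi k : Int) :
    ∀ (m : Nat) (z : Int),
      pvTif (fun x => decide (lo ≤ x ∧ x ≤ hi)) k z m
      = pvR k (max z lo) ((min (z + m) (hi + 1)) - max z lo).toNat := by
  intro m
  induction m with
  | zero =>
    intro z
    rw [show ((min (z + (0:Nat)) (hi + 1)) - max z lo).toNat = 0 by omega]
    rfl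
  | succ m ih =>
    intro z
    simp only [pvTif, ih (z+1)]
    by_cases hz : lo ≤ z ∧ z ≤ hi
    · rw [show max z lo = z by omega, show max (z+1) lo = z+1 by omega]
      have he : min (z + 1 + (m:Int)) (hi + 1) = min (z + ((m:Nat)+1:Nat)) (hi + 1) := by
        push_cast; ring_nf
      rw [he, show ((min (z + ((m:Nat)+1:Nat)) (hi + 1)) - z).toNat
          = ((min (z + ((m:Nat)+1:Nat)) (hi + 1)) - (z+1)).toNat + 1 by push_cast at *; omega]
      simp only [pvR, hz]
      simp
    · rcases (by omega : z < lo ∨ hi < z) with h | h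
      · rw [show max z lo = lo by omega, show max (z+1) lo = lo by omega,
            show min (z + 1 + (m:Int)) (hi + 1) = min (z + ((m:Nat)+1:Nat)) (hi + 1) by push_cast; ring_nf]
        simp [show decide (lo ≤ z ∧ z ≤ hi) = false by simp; omega]
      · rw [show ((min (z + 1 + (m:Int)) (hi + 1)) - max (z+1) lo).toNat = 0 by omega,
            show ((min (z + ((m:Nat)+1:Nat)) (hi + 1)) - max z lo).toNat = 0 by push_cast; omega]
        simp [show decide (lo ≤ z ∧ z ≤ hi) = false by simp; omega, pvR]

-- one A-iteration on the (always four-key) dict, as an explicit case split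
lemma pvStepA_eq (lo_sub hi_sub lo_q hi_q k b o5 o6 ne z : Int) :
    pvStepA lo_sub hi_sub lo_q hi_q k
      (PySem.Dict.ofList [("both", b), ("only_wt5", o5), ("only_wt6", o6), ("neither", ne)]) z
    = if lo_sub ≤ z ∧ z ≤ hi_sub then
        (if lo_q ≤ z ∧ z ≤ hi_q then
          PySem.Dict.ofList [("both", b + pvComb k z), ("only_wt5", o5), ("only_wt6", o6), ("neither", ne)]
        else
          PySem.Dict.ofList [("both", b), ("only_wt5", o5 + pvComb k z), ("only_wt6", o6), ("neither", ne)])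
      else
        (if lo_q ≤ z ∧ z ≤ hi_q then
          PySem.Dict.ofList [("both", b), ("only_wt5", o5), ("only_wt6", o6 + pvComb k z), ("neither", ne)]
        else
          PySem.Dict.ofList [("both", b), ("only_wt5", o5), ("only_wt6", o6), ("neither", ne + pvComb k z)]) := by
  by_cases hs : lo_sub ≤ z ∧ z ≤ hi_sub <;> by_cases hq : lo_q ≤ z ∧ z ≤ hi_q <;>
    simp only [pvStepA, in_interval, cell, hs, hq, decide_false, if_neg, not_false_iff,
      Bool.true_and, Bool.false_and, Bool.and_true, Bool.and_false, Bool.not_false] <;> rfl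

-- A's loop computes the four filtered sums
lemma pvA_loop (ls hs lq hq k : Int) (m : Nat) :
    ∀ (z : Int), 0 ≤ z → z + m = k + 1 → ∀ (b o5 o6 ne : Int),
    ((PySem.List.pyRange z (k + 1) 1).foldl (pvStepA ls hs lq hq k)
      (PySem.Dict.ofList [("both", b), ("only_wt5", o5), ("only_wt6", o6), ("neither", ne)])).items
    = [("both", b + pvTif (fun x => decide (ls ≤ x ∧ x ≤ hs) && decide (lq ≤ x ∧ x ≤ hq)) k z m),
       ("only_wt5", o5 + pvTif (fun x => decide (ls ≤ x ∧ x ≤ hs) && !decide (lq ≤ x ∧ x ≤ hq)) k z m),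
       ("only_wt6", o6 + pvTif (fun x => !decide (ls ≤ x ∧ x ≤ hs) && decide (lq ≤ x ∧ x ≤ hq)) k z m),
       ("neither", ne + pvTif (fun x => !decide (ls ≤ x ∧ x ≤ hs) && !decide (lq ≤ x ∧ x ≤ hq)) k z m)] := by
  induction m with
  | zero =>
    intro z hz hm b o5 o6 ne
    have he : PySem.List.pyRange z (k + 1) 1 = [] := by
      rw [PySem.List.pyRange_one, show (k + 1 - z).toNat = 0 by omega]; rfl
    rw [he]
    simp only [List.foldl_nil, pvTif, add_zero]
    rfl
  | succ m ih =>
    intro z hz hm b o5 o6 ne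
    have hlt : z < k + 1 := by omega
    rw [PySem.List.pyRange_one_cons hlt]
    simp only [List.foldl_cons, pvStepA_eq]
    by_cases hsz : ls ≤ z ∧ z ≤ hs
    · by_cases hqz : lq ≤ z ∧ z ≤ hq
      · rw [if_pos hsz, if_pos hqz, ih (z+1) (by omega) (by omega)]
        simp only [pvTif]; simp [hsz, hqz, add_assoc]
      · rw [if_pos hsz, if_neg hqz, ih (z+1) (by omega) (by omega)]
        simp only [pvTif]; simp [hsz, hqz, add_assoc]
    · by_cases hqz : lq ≤ z ∧ z ≤ hq
      · rw [if_neg hsz, if_pos hqz, ih (z+1) (by omega) (by omega)]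
        simp only [pvTif]; simp [hsz, hqz, add_assoc]
      · rw [if_neg hsz, if_neg hqz, ih (z+1) (by omega) (by omega)]
        simp only [pvTif]; simp [hsz, hqz, add_assoc]

-- B's prefix loop builds the partial-sum table and the running total
lemma pvB_loop (k : Int) (m : Nat) :
    ∀ (z : Int), 0 ≤ z → z + m = k + 1 → ∀ (pref : List Int) (s : Int),
    (PySem.List.pyRange z (k + 1) 1).foldl (pvStepP k) (pref, s, pvComb k z)
    = (pref ++ (List.range m).map (fun i => s + pvR k z (i + 1)),
       s + pvR k z m, pvComb k (k + 1)) := by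
  induction m with
  | zero =>
    intro z hz hm pref s
    have he : PySem.List.pyRange z (k + 1) 1 = [] := by
      rw [PySem.List.pyRange_one, show (k + 1 - z).toNat = 0 by omega]; rfl
    rw [he, show z = k + 1 by omega]
    simp [pvR]
  | succ m ih =>
    intro z hz hm pref s
    have hlt : z < k + 1 := by
      have : ((m:Int) + 1) > 0 := by positivity
      omega
    rw [PySem.List.pyRange_one_cons hlt]
    simp only [List.foldl_cons, pvStepP]
    rw [pvComb_step k z hz (by omega), ih (z+1) (by omega) (by omega)]
    have h1 : pref ++ [s + pvComb k z]
        ++ List.map (fun i => s + pvComb k z + pvR k (z + 1) (i + 1)) (List.range m)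
        = pref ++ List.map (fun i => s + pvR k z (i + 1)) (List.range (m + 1)) := by
      rw [List.range_succ_eq_map, List.map_cons, List.map_map, List.append_assoc,
          List.singleton_append]
      congr 1
      congr 1
      refine List.map_congr_left (fun i _ => ?_)
      simp only [Function.comp_apply, pvR]
      ring
    have h2 : s + pvComb k z + pvR k (z + 1) m = s + pvR k z (m + 1) := by
      simp only [pvR]; ring
    rw [h1, h2]

-- prefix[i] as a partial sum, for 0 ≤ i ≤ k+1 (k ≥ 0)
lemma pvPrefix_get (k : Int) (hk : 0 ≤ k) (i : Int) (h0 : 0 ≤ i) (h1 : i ≤ k + 1) :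
    (PySem.List.pyGet? ((0:Int) :: (List.range (k+1).toNat).map (fun j => pvR k 0 (j + 1))) i).getD 0
    = pvR k 0 i.toNat := by
  rcases (by omega : i = 0 ∨ 1 ≤ i) with h | h
  · subst h; simp [pvR]
  · rw [PySem.List.pyGet?_of_nonneg _ h0]
    have hi : i.toNat = (i.toNat - 1) + 1 := by omega
    rw [hi]
    have hlen : i.toNat - 1 < (k+1).toNat := by omega
    simp only [List.getElem?_cons_succ, List.getElem?_map, List.getElem?_range hlen,
      Option.map_some, Option.getD_some]

-- pvRs on the built prefix equals a contiguous pvR block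
lemma pvRs_eq (k : Int) (hk : 0 ≤ k) (lo hi : Int) (hlo : 0 ≤ lo) (hhi : hi ≤ k) :
    pvRs ((0:Int) :: (List.range (k+1).toNat).map (fun j => pvR k 0 (j + 1))) lo hi
    = pvR k lo (hi + 1 - lo).toNat := by
  unfold pvRs
  by_cases h : lo ≤ hi
  · rw [if_pos h, pvPrefix_get k hk (hi+1) (by omega) (by omega),
        pvPrefix_get k hk lo hlo (by omega)]
    have hsplit := pvR_split k lo.toNat (hi + 1 - lo).toNat 0
    rw [show lo.toNat + (hi + 1 - lo).toNat = (hi+1).toNat by omega] at hsplit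
    rw [hsplit, show (0:Int) + (lo.toNat : Int) = lo by omega]
    ring
  · rw [if_neg h, show (hi + 1 - lo).toNat = 0 by omega]
    rfl

-- ===== VERDICT (by name: the statement is the Claim_ definition above) =====
theorem formula_counts_per_q_spec : Claim_equal_formula_counts_per_q := by
  intro n k t _
  unfold Spec_formula_counts_per_q formula_counts_per_q formula_counts_per_q_alt
  simp only [z_interval]
  set ls := max 0 (t - 1 - (n - k)) with hls
  set hs := min k (t - 1) with hhs
  set lq := max 0 (t - (n - k)) with hlq
  set hq := min k t with hhq
  by_cases hk : 0 ≤ k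
  · -- nonneg k: both loops run (k+1).toNat times
    have hA := pvA_loop ls hs lq hq k (k+1).toNat 0 le_rfl (by omega) 0 0 0 0
    have hB := pvB_loop k (k+1).toNat 0 le_rfl (by omega) [0] 0
    rw [show pvComb k 0 = 1 by simp [pvComb]] at hB
    rw [hA, hB]
    simp only [List.singleton_append, zero_add]
    -- interval facts
    have h1 : ls ≤ lq := by omega
    have h2 : hs ≤ hq := by omega
    have h3 : 0 ≤ ls := by omega
    have h4 : 0 ≤ lq := by omega
    have h5 : hs ≤ k := by omega
    have h6 : hq ≤ k := by omega
    -- rewrite the three pvRs queries as pvR blocks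
    rw [pvRs_eq k hk lq hs h4 h5, pvRs_eq k hk ls (min hs (lq - 1)) h3 (by omega),
        pvRs_eq k hk (max lq (hs + 1)) hq (by omega) h6]
    -- rewrite the four pvTif sums as pvR blocks
    have eB : pvTif (fun x => decide (ls ≤ x ∧ x ≤ hs) && decide (lq ≤ x ∧ x ≤ hq)) k 0 (k+1).toNat
        = pvR k lq (hs + 1 - lq).toNat := by
      rw [pvTif_ext _ (fun x => decide (lq ≤ x ∧ x ≤ hs)) k
            (by intro x; rw [← Bool.decide_and]; exact decide_eq_decide.mpr (by omega)),
          pvTif_int lq hs k]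
      rw [show max (0:Int) lq = lq by omega,
          show min ((0:Int) + ((k+1).toNat : Nat)) (hs + 1) = hs + 1 by omega]
    have e5 : pvTif (fun x => decide (ls ≤ x ∧ x ≤ hs) && !decide (lq ≤ x ∧ x ≤ hq)) k 0 (k+1).toNat
        = pvR k ls (min hs (lq - 1) + 1 - ls).toNat := by
      rw [pvTif_ext _ (fun x => decide (ls ≤ x ∧ x ≤ min hs (lq - 1))) k
            (by intro x; rw [← decide_not, ← Bool.decide_and]; exact decide_eq_decide.mpr (by omega)),
          pvTif_int ls (min hs (lq - 1)) k]
      rw [show max (0:Int) ls = ls by omega,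
          show min ((0:Int) + ((k+1).toNat : Nat)) (min hs (lq - 1) + 1) = min hs (lq - 1) + 1 by omega]
    have e6 : pvTif (fun x => !decide (ls ≤ x ∧ x ≤ hs) && decide (lq ≤ x ∧ x ≤ hq)) k 0 (k+1).toNat
        = pvR k (max lq (hs + 1)) (hq + 1 - max lq (hs + 1)).toNat := by
      rw [pvTif_ext _ (fun x => decide (max lq (hs + 1) ≤ x ∧ x ≤ hq)) k
            (by intro x; rw [← decide_not, ← Bool.decide_and]; exact decide_eq_decide.mpr (by omega)),
          pvTif_int (max lq (hs + 1)) hq k]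
      rw [show max (0:Int) (max lq (hs + 1)) = max lq (hs + 1) by omega,
          show min ((0:Int) + ((k+1).toNat : Nat)) (hq + 1) = hq + 1 by omega]
    have eN : pvTif (fun x => !decide (ls ≤ x ∧ x ≤ hs) && !decide (lq ≤ x ∧ x ≤ hq)) k 0 (k+1).toNat
        = pvR k 0 (k+1).toNat
          - pvR k lq (hs + 1 - lq).toNat
          - pvR k ls (min hs (lq - 1) + 1 - ls).toNat
          - pvR k (max lq (hs + 1)) (hq + 1 - max lq (hs + 1)).toNat := by
      have hp := pvPartition (fun x => decide (ls ≤ x ∧ x ≤ hs)) (fun x => decide (lq ≤ x ∧ x ≤ hq))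
        k (k+1).toNat 0
      rw [eB, e5, e6] at hp
      omega
    rw [eB, e5, e6, eN]
  · -- k < 0: empty loops on both sides
    have he : PySem.List.pyRange 0 (k + 1) 1 = [] := by
      rw [PySem.List.pyRange_one, show (k + 1 - 0).toNat = 0 by omega]; rfl
    rw [he]
    simp only [List.foldl_nil]
    have r1 : pvRs [0] lq hs = 0 := by unfold pvRs; rw [if_neg (by omega)]
    have r2 : pvRs [0] ls (min hs (lq - 1)) = 0 := by unfold pvRs; rw [if_neg (by omega)]
    have r3 : pvRs [0] (max lq (hs + 1)) hq = 0 := by unfold pvRs; rw [if_neg (by omega)]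
    rw [r1, r2, r3]
    rfl
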